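-- pv_equiv track=rewrite | github.com/micanipho/Practice-test | tests/__pycache__/student_code.py | skip_num
-- ===== SOURCE A (Python) =====
-- def skip_num(n: int, length: int):
--
--     """
--     Generate a list of numbers from 1 to length, skipping a specific number.
--
--     Parameters:
--     n (int): The number to skip.
--     length (int): The upper limit for generating numbers.
--
--     Returns:
--     list: A list of integers from 1 to length, excluding n.
--     """
--
--     num_list = []
--     for i in range(1, length + 1):
--         if i == n:
--             continue
--         else:
--             num_list.append(i)
--
--     return num_list
-- ===== SOURCE B (Python) =====
-- def skip_num(n: int, length: int):
--     nums = list(range(1, length + 1))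
--     try:
--         nums.remove(n)
--     except ValueError:
--         pass
--     return nums
-- ===== Notes on version B (the rewrite author's own statement) =====
-- stated objective: alternative
-- what changed: B builds the full list 1..length in one step and then deletes n with a single list.remove (try/except for the absent case), instead of A's loop that tests every element against n while building.
import Mathlib
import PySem

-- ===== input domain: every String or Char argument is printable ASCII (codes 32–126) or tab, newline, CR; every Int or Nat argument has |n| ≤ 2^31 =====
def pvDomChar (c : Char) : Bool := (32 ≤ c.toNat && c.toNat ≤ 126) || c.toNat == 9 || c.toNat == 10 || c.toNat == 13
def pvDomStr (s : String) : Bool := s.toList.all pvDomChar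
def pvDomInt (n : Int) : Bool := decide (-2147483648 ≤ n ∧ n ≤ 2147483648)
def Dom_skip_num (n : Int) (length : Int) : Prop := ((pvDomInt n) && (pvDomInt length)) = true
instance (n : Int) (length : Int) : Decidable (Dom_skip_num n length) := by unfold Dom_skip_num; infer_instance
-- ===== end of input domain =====

-- B builds the full list 1..length, then deletes n with one list.remove (try/except); objective: alternative decomposition.

-- ===== PORT A =====
-- A's loop: per-element test, append on the else-branch (append rendered linearly as cons + final reverse)
def skip_num (n : Int) (length : Int) : List Int :=
  ((PySem.List.pyRange 1 (length + 1) 1).foldl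
    (fun num_list i => if i = n then num_list else i :: num_list) []).reverse

-- ===== PORT B =====
-- nums = list(range(1, length+1)); try: nums.remove(n) except ValueError: pass
def skip_num_alt (n : Int) (length : Int) : List Int :=
  let nums := PySem.List.pyRange 1 (length + 1) 1
  match PySem.List.remove? nums n with
  | some r => r
  | none => nums

-- ===== PRECONDITION & SPEC =====
def Spec_skip_num (n : Int) (length : Int) (out : List Int) : Prop := out = skip_num_alt n length
instance (n : Int) (length : Int) (out : List Int) : Decidable (Spec_skip_num n length out) := by unfold Spec_skip_num; infer_instance

-- ===== CLAIM (what is proved, stated in full; the proofs are below) =====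
def Claim_equal_skip_num : Prop := ∀ (n : Int) (length : Int), Dom_skip_num n length → Spec_skip_num n length (skip_num n length)

-- ===== LEMMAS AND PROOFS =====

theorem foldl_cons_ite (n : Int) (l acc : List Int) :
    l.foldl (fun num_list i => if i = n then num_list else i :: num_list) acc
      = (l.filter (fun i => ¬ i = n)).reverse ++ acc := by
  induction l generalizing acc with
  | nil => simp
  | cons x xs ih =>
    by_cases h : x = n <;> simp [List.foldl_cons, h, ih]

theorem skip_num_eq_filter (n length : Int) :
    skip_num n length = (PySem.List.pyRange 1 (length + 1) 1).filter (fun i => ¬ i = n) := by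
  unfold skip_num
  rw [foldl_cons_ite]
  simp

theorem filter_ne_of_not_mem {n : Int} (l : List Int) (h : n ∉ l) :
    l.filter (fun i => ¬ i = n) = l := by
  apply List.filter_eq_self.mpr
  intro a ha
  simp only [decide_eq_true_eq]
  intro hne; exact h (hne ▸ ha)

theorem erase_eq_filter_ne_of_nodup {n : Int} (l : List Int) (hnd : l.Nodup) :
    l.erase n = l.filter (fun i => ¬ i = n) := by
  induction l with
  | nil => simp
  | cons x xs ih =>
    rcases List.nodup_cons.mp hnd with ⟨hx, hxs⟩
    by_cases h : x = n
    · subst h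
      simp only [List.erase_cons_head, List.filter_cons]
      simpa using (filter_ne_of_not_mem xs hx).symm
    · simp [List.erase_cons_tail (by simpa using Ne.symm (fun e => h e.symm) : ¬ (x == n) = true), h, ih hxs]

-- ===== VERDICT (by name: the statement is the Claim_ definition above) =====
theorem skip_num_spec : Claim_equal_skip_num := by
  intro n length _
  show skip_num n length = skip_num_alt n length
  rw [skip_num_eq_filter]
  unfold skip_num_alt
  simp only []
  by_cases hm : n ∈ PySem.List.pyRange 1 (length + 1) 1
  · rw [PySem.List.remove?_eq_some_erase _ n hm]
    simpa using (erase_eq_filter_ne_of_nodup _ (PySem.List.nodup_pyRange_one _ _)).symm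
  · rw [(PySem.List.remove?_eq_none_iff _ n).mpr hm]
    simpa using filter_ne_of_not_mem _ hm
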